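-- pv_equiv track=rewrite | github.com/mguzdial3/CrIB | painting/generator.py | SquareDefine
-- ===== SOURCE A (Python) =====
-- def SquareDefine(canvas, minX, minY, maxX, maxY, color1, color2=None):
--     size = min(maxX-minX, maxY-minY)
--     for x in range(minX, size+minX):
--         for y in range(minY,size+minY):
--             if x==minX or y==minY or x==(minX+size-1) or y==(minY+size-1):
--                 if color2==None:
--                     canvas[x][y] = color1
--                 else:
--                     canvas[x][y] = color2
--             else:
--                 canvas[x][y] = color1
--     return canvas
-- ===== SOURCE B (Python) =====
-- def SquareDefine(canvas, minX, minY, maxX, maxY, color1, color2=None):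
--     # Fill the whole square with color1, then (if given) repaint the border with color2.
--     # Mutates canvas in place, like the original.
--     size = min(maxX - minX, maxY - minY)
--     for x in range(minX, minX + size):
--         for y in range(minY, minY + size):
--             canvas[x][y] = color1
--     if color2 is not None:
--         for x in range(minX, minX + size):
--             canvas[x][minY] = color2
--             canvas[x][minY + size - 1] = color2
--         for y in range(minY, minY + size):
--             canvas[minX][y] = color2
--             canvas[minX + size - 1][y] = color2
--     return canvas
-- ===== Notes on version B (the rewrite author's own statement) =====
-- stated objective: alternative
-- what changed: Replaces the per-cell border test inside the double loop by a fill-then-repaint decomposition: one double loop paints the whole square color1, then four edge passes overwrite the border with color2 when it is given.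
-- outside the precondition, e.g. on SquareDefine([[0, 0], [0, 0]], -2, -2, 2, 2, 1, 9): A returns [[1, 9], [9, 9]], B returns [[9, 9], [9, 9]]
import Mathlib
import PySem

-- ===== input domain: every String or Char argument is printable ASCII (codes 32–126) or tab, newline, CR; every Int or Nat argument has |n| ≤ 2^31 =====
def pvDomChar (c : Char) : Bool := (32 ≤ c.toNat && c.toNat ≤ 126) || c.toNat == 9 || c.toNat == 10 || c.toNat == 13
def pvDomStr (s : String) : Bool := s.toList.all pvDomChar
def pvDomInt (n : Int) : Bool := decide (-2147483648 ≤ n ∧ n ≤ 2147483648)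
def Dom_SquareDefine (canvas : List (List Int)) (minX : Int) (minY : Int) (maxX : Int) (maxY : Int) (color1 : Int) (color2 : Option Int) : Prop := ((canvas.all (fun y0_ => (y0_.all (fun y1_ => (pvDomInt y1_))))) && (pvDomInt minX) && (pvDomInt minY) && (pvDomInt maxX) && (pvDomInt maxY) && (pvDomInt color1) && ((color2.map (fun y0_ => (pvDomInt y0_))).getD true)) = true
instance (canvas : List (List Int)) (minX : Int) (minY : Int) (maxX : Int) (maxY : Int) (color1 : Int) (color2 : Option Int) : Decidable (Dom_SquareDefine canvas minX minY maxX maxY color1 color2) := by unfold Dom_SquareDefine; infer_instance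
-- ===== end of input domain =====

-- B replaces A's per-cell border test by fill-then-repaint-border (same cost, different decomposition);
-- equivalence is about the RETURN value only (the Python versions mutate `canvas` in place).

-- canvas[x][y] = v  (shared transliteration of the Python assignment statement)
def pvWrite (cv : List (List Int)) (x y v : Int) : List (List Int) :=
  PySem.List.pySetD cv x (PySem.List.pySetD (PySem.List.pyGetD cv x []) y v)

-- ===== PORT A =====
def SquareDefine (canvas : List (List Int)) (minX : Int) (minY : Int) (maxX : Int) (maxY : Int) (color1 : Int) (color2 : Option Int) : List (List Int) :=
  let size := min (maxX - minX) (maxY - minY)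
  (PySem.List.pyRange minX (size + minX) 1).foldl (fun cv x =>
    (PySem.List.pyRange minY (size + minY) 1).foldl (fun cv y =>
      if x = minX ∨ y = minY ∨ x = minX + size - 1 ∨ y = minY + size - 1 then
        match color2 with
        | none => pvWrite cv x y color1
        | some c => pvWrite cv x y c
      else pvWrite cv x y color1) cv) canvas

-- ===== PORT B =====
def SquareDefine_alt (canvas : List (List Int)) (minX : Int) (minY : Int) (maxX : Int) (maxY : Int) (color1 : Int) (color2 : Option Int) : List (List Int) :=
  let size := min (maxX - minX) (maxY - minY)
  let filled := (PySem.List.pyRange minX (minX + size) 1).foldl (fun cv x =>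
      (PySem.List.pyRange minY (minY + size) 1).foldl (fun cv y => pvWrite cv x y color1) cv) canvas
  match color2 with
  | none => filled
  | some c2 =>
    let h := (PySem.List.pyRange minX (minX + size) 1).foldl
      (fun cv x => pvWrite (pvWrite cv x minY c2) x (minY + size - 1) c2) filled
    (PySem.List.pyRange minY (minY + size) 1).foldl
      (fun cv y => pvWrite (pvWrite cv minX y c2) (minX + size - 1) y c2) h

-- ===== PRECONDITION & SPEC =====
-- Pre_ excludes inputs where a painted index is negative (Python's negative-index wraparound makes
-- distinct loop coordinates alias the same cell, an artefact of the in-place mutation) or out of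
-- range (A raises IndexError there).
def Pre_SquareDefine (canvas : List (List Int)) (minX : Int) (minY : Int) (maxX : Int) (maxY : Int) (color1 : Int) (color2 : Option Int) : Prop :=
  0 < min (maxX - minX) (maxY - minY) →
    (0 ≤ minX ∧ 0 ≤ minY ∧ minX + min (maxX - minX) (maxY - minY) ≤ (canvas.length : Int) ∧
     ∀ x ∈ PySem.List.pyRange minX (minX + min (maxX - minX) (maxY - minY)) 1,
       minY + min (maxX - minX) (maxY - minY) ≤ ((PySem.List.pyGetD canvas x []).length : Int))
instance (canvas : List (List Int)) (minX : Int) (minY : Int) (maxX : Int) (maxY : Int) (color1 : Int) (color2 : Option Int) : Decidable (Pre_SquareDefine canvas minX minY maxX maxY color1 color2) := by unfold Pre_SquareDefine; infer_instance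

def pvWitness_SquareDefine : List (List Int) × Int × Int × Int × Int × Int × Option Int :=
  ([[0, 0], [0, 0]], 0, 0, 2, 2, 5, some 7)

def Spec_SquareDefine (canvas : List (List Int)) (minX : Int) (minY : Int) (maxX : Int) (maxY : Int) (color1 : Int) (color2 : Option Int) (out : List (List Int)) : Prop := out = SquareDefine_alt canvas minX minY maxX maxY color1 color2
instance (canvas : List (List Int)) (minX : Int) (minY : Int) (maxX : Int) (maxY : Int) (color1 : Int) (color2 : Option Int) (out : List (List Int)) : Decidable (Spec_SquareDefine canvas minX minY maxX maxY color1 color2 out) := by unfold Spec_SquareDefine; infer_instance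

-- ===== CLAIM (what is proved, stated in full; the proofs are below) =====
def Claim_equal_SquareDefine : Prop := ∀ (canvas : List (List Int)) (minX : Int) (minY : Int) (maxX : Int) (maxY : Int) (color1 : Int) (color2 : Option Int), Dom_SquareDefine canvas minX minY maxX maxY color1 color2 → Pre_SquareDefine canvas minX minY maxX maxY color1 color2 → Spec_SquareDefine canvas minX minY maxX maxY color1 color2 (SquareDefine canvas minX minY maxX maxY color1 color2)

-- ===== LEMMAS AND PROOFS =====

-- Nat-indexed model of the writes
def pvSetCell (cv : List (List Int)) (i j : Nat) (v : Int) : List (List Int) :=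
  cv.set i ((cv.getD i []).set j v)

def pvApply (cv : List (List Int)) (ws : List (Nat × Nat × Int)) : List (List Int) :=
  ws.foldl (fun c w => pvSetCell c w.1 w.2.1 w.2.2) cv

def pvCell (cv : List (List Int)) (i j : Nat) : Int := (cv.getD i []).getD j 0

-- last write to cell (i,j) in a write list (later entries win)
def pvLW : List (Nat × Nat × Int) → Nat → Nat → Option Int
  | [], _, _ => none
  | w :: ws, i, j => (pvLW ws i j).or (if i = w.1 ∧ j = w.2.1 then some w.2.2 else none)

def pvRow (i0 b m : Nat) (h : Nat → Int) : List (Nat × Nat × Int) :=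
  (List.range m).map (fun kj => (i0, b + kj, h kj))

def pvRect (a b n m : Nat) (g : Nat → Nat → Int) : List (Nat × Nat × Int) :=
  (List.range n).flatMap (fun ki => pvRow (a + ki) b m (fun kj => g (a + ki) (b + kj)))

def pvTB (a b b2 n : Nat) (c : Int) : List (Nat × Nat × Int) :=
  (List.range n).flatMap (fun ki => [(a + ki, b, c), (a + ki, b2, c)])

def pvLR (a a2 b n : Nat) (c : Int) : List (Nat × Nat × Int) :=
  (List.range n).flatMap (fun kj => [(a, b + kj, c), (a2, b + kj, c)])

theorem pvWrite_natCast (cv : List (List Int)) (a b : Nat) (v : Int) :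
    pvWrite cv (a : Int) (b : Int) v = pvSetCell cv a b v := by
  simp [pvWrite, pvSetCell, PySem.List.pySetD_natCast, PySem.List.pyGetD_natCast]

theorem length_pvSetCell (cv : List (List Int)) (i j : Nat) (v : Int) :
    (pvSetCell cv i j v).length = cv.length := by simp [pvSetCell]

theorem rowlen_pvSetCell (cv : List (List Int)) (i j : Nat) (v : Int) (i' : Nat) :
    ((pvSetCell cv i j v).getD i' []).length = (cv.getD i' []).length := by
  unfold pvSetCell
  by_cases h : i' = i
  · subst h
    by_cases hl : i' < cv.length
    · simp [List.getD_eq_getElem?_getD, List.getElem?_set, hl]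
    · rw [List.set_eq_of_length_le (by omega)]
  · simp [List.getD_eq_getElem?_getD, List.getElem?_set, Ne.symm h]

theorem pvCell_pvSetCell (cv : List (List Int)) (i j : Nat) (v : Int)
    (hi : i < cv.length) (hj : j < (cv.getD i []).length) (i' j' : Nat) :
    pvCell (pvSetCell cv i j v) i' j' =
      if i' = i ∧ j' = j then v else pvCell cv i' j' := by
  unfold pvCell pvSetCell
  rw [List.getD_eq_getElem?_getD, List.getElem?_eq_getElem hi] at hj
  simp only [Option.getD_some] at hj
  by_cases h1 : i' = i
  · subst h1
    by_cases h2 : j' = j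
    · subst h2
      simp [List.getD_eq_getElem?_getD, List.getElem?_set, hi, hj]
    · simp [List.getD_eq_getElem?_getD, List.getElem?_set, hi, h2, Ne.symm h2]
  · simp [List.getD_eq_getElem?_getD, List.getElem?_set, Ne.symm h1, h1]

theorem length_pvApply (ws : List (Nat × Nat × Int)) (cv : List (List Int)) :
    (pvApply cv ws).length = cv.length := by
  induction ws generalizing cv with
  | nil => rfl
  | cons w ws ih =>
    rw [show pvApply cv (w :: ws) = pvApply (pvSetCell cv w.1 w.2.1 w.2.2) ws from rfl,
      ih, length_pvSetCell]

theorem rowlen_pvApply (ws : List (Nat × Nat × Int)) (cv : List (List Int)) (i : Nat) :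
    ((pvApply cv ws).getD i []).length = (cv.getD i []).length := by
  induction ws generalizing cv with
  | nil => rfl
  | cons w ws ih =>
    rw [show pvApply cv (w :: ws) = pvApply (pvSetCell cv w.1 w.2.1 w.2.2) ws from rfl,
      ih, rowlen_pvSetCell]

theorem pvCell_pvApply (ws : List (Nat × Nat × Int)) (cv : List (List Int)) (i j : Nat)
    (hb : ∀ w ∈ ws, w.1 < cv.length ∧ w.2.1 < (cv.getD w.1 []).length) :
    pvCell (pvApply cv ws) i j = (pvLW ws i j).getD (pvCell cv i j) := by
  induction ws generalizing cv with
  | nil => rfl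
  | cons w ws ih =>
    obtain ⟨hw1, hw2⟩ := hb w (List.mem_cons_self ..)
    rw [show pvApply cv (w :: ws) = pvApply (pvSetCell cv w.1 w.2.1 w.2.2) ws from rfl]
    rw [ih _ (by
      intro w' hw'
      obtain ⟨h1, h2⟩ := hb w' (List.mem_cons_of_mem _ hw')
      refine ⟨by rwa [length_pvSetCell], by rwa [rowlen_pvSetCell]⟩)]
    rw [pvCell_pvSetCell cv w.1 w.2.1 w.2.2 hw1 hw2 i j]
    show _ = (pvLW (w :: ws) i j).getD (pvCell cv i j)
    rw [show pvLW (w :: ws) i j =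
      (pvLW ws i j).or (if i = w.1 ∧ j = w.2.1 then some w.2.2 else none) from rfl]
    cases hlw : pvLW ws i j with
    | some v => simp
    | none =>
      by_cases hm : i = w.1 ∧ j = w.2.1
      · simp [hm]
      · simp [hm]

theorem pvApply_append (cv : List (List Int)) (xs ys : List (Nat × Nat × Int)) :
    pvApply cv (xs ++ ys) = pvApply (pvApply cv xs) ys := by
  simp [pvApply, List.foldl_append]

theorem pvApply_foldl {α : Type} (l : List α) (g : α → List (Nat × Nat × Int)) (cv : List (List Int)) :
    l.foldl (fun c x => pvApply c (g x)) cv = pvApply cv (l.flatMap g) := by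
  induction l generalizing cv with
  | nil => rfl
  | cons x l ih => simp [List.flatMap_cons, pvApply_append, ih]

theorem pvLW_append (xs ys : List (Nat × Nat × Int)) (i j : Nat) :
    pvLW (xs ++ ys) i j = (pvLW ys i j).or (pvLW xs i j) := by
  induction xs with
  | nil => simp [pvLW]
  | cons x xs ih => simp [pvLW, ih, Option.or_assoc]

theorem pvOrIf (P Q : Prop) [Decidable P] [Decidable Q] (c : Int) :
    ((if P then some c else none).or (if Q then some c else none))
      = if P ∨ Q then some c else none := by
  by_cases hP : P <;> by_cases hQ : Q <;> simp [hP, hQ]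

theorem pvLW_pvRow (i0 b m : Nat) (h : Nat → Int) (i j : Nat) :
    pvLW (pvRow i0 b m h) i j =
      if i = i0 ∧ b ≤ j ∧ j < b + m then some (h (j - b)) else none := by
  induction m with
  | zero =>
    simp [pvRow, pvLW]
    all_goals omega
  | succ m ih =>
    rw [pvRow, List.range_succ, List.map_append, pvLW_append]
    rw [show ((List.range m).map fun kj => (i0, b + kj, h kj)) = pvRow i0 b m h from rfl, ih]
    simp only [List.map_cons, List.map_nil, pvLW, Option.none_or]
    by_cases h1 : i = i0 ∧ j = b + m
    · simp [h1, show i = i0 ∧ b ≤ j ∧ j < b + (m + 1) by omega, show j - b = m by omega]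
    · by_cases h2 : i = i0 ∧ b ≤ j ∧ j < b + m
      · simp [h1, h2, show i = i0 ∧ b ≤ j ∧ j < b + (m + 1) by omega,
          show ¬j = b + m from fun hh => h1 ⟨h2.1, hh⟩]
      · simp [h1, h2, show ¬(i = i0 ∧ b ≤ j ∧ j < b + (m + 1)) by omega]

theorem pvLW_pvRect (a b n m : Nat) (g : Nat → Nat → Int) (i j : Nat) :
    pvLW (pvRect a b n m g) i j =
      if a ≤ i ∧ i < a + n ∧ b ≤ j ∧ j < b + m then some (g i j) else none := by
  induction n with
  | zero =>
    simp [pvRect, pvLW]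
    all_goals omega
  | succ n ih =>
    rw [pvRect, List.range_succ, List.flatMap_append, pvLW_append]
    rw [show ((List.range n).flatMap fun ki => pvRow (a + ki) b m
          (fun kj => g (a + ki) (b + kj))) = pvRect a b n m g from rfl, ih]
    simp only [List.flatMap_cons, List.flatMap_nil, List.append_nil, pvLW_pvRow]
    by_cases h1 : i = a + n ∧ b ≤ j ∧ j < b + m
    · simp [h1, show a ≤ i ∧ i < a + (n + 1) ∧ b ≤ j ∧ j < b + m by omega,
        show b + (j - b) = j by omega, h1.1]
    · by_cases h2 : a ≤ i ∧ i < a + n ∧ b ≤ j ∧ j < b + m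
      · simp [h1, h2, show a ≤ i ∧ i < a + (n + 1) ∧ b ≤ j ∧ j < b + m by omega,
          show ¬i = a + n by omega]
      · simp [h1, h2, show ¬(a ≤ i ∧ i < a + (n + 1) ∧ b ≤ j ∧ j < b + m) by omega]

theorem pvLW_pvTB (a b b2 n : Nat) (c : Int) (i j : Nat) :
    pvLW (pvTB a b b2 n c) i j =
      if a ≤ i ∧ i < a + n ∧ (j = b ∨ j = b2) then some c else none := by
  induction n with
  | zero =>
    simp [pvTB, pvLW]
    all_goals omega
  | succ n ih =>
    rw [pvTB, List.range_succ, List.flatMap_append, pvLW_append]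
    rw [show ((List.range n).flatMap fun ki => [(a + ki, b, c), (a + ki, b2, c)])
          = pvTB a b b2 n c from rfl, ih]
    simp only [List.flatMap_cons, List.flatMap_nil, List.append_nil, pvLW, Option.none_or]
    rw [pvOrIf, pvOrIf]
    exact if_congr (by omega) rfl rfl

theorem pvLW_pvLR (a a2 b n : Nat) (c : Int) (i j : Nat) :
    pvLW (pvLR a a2 b n c) i j =
      if b ≤ j ∧ j < b + n ∧ (i = a ∨ i = a2) then some c else none := by
  induction n with
  | zero =>
    simp [pvLR, pvLW]
    all_goals omega
  | succ n ih =>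
    rw [pvLR, List.range_succ, List.flatMap_append, pvLW_append]
    rw [show ((List.range n).flatMap fun kj => [(a, b + kj, c), (a2, b + kj, c)])
          = pvLR a a2 b n c from rfl, ih]
    simp only [List.flatMap_cons, List.flatMap_nil, List.append_nil, pvLW, Option.none_or]
    rw [pvOrIf, pvOrIf]
    exact if_congr (by omega) rfl rfl

-- fold-to-write-list conversions
theorem row_fold (cv : List (List Int)) (i0 b m : Nat) (h : Nat → Int) :
    (List.range m).foldl (fun cv kj => pvSetCell cv i0 (b + kj) (h kj)) cv
      = pvApply cv (pvRow i0 b m h) := by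
  simp [pvApply, pvRow, List.foldl_map]

theorem rect_fold (cv : List (List Int)) (a b n m : Nat) (g : Nat → Nat → Int) :
    (List.range n).foldl (fun cv ki =>
        (List.range m).foldl (fun cv kj => pvSetCell cv (a + ki) (b + kj) (g (a + ki) (b + kj))) cv) cv
      = pvApply cv (pvRect a b n m g) := by
  have : (fun (cv : List (List Int)) (ki : Nat) =>
      (List.range m).foldl (fun cv kj => pvSetCell cv (a + ki) (b + kj) (g (a + ki) (b + kj))) cv)
      = fun cv ki => pvApply cv (pvRow (a + ki) b m (fun kj => g (a + ki) (b + kj))) := by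
    funext cv ki; rw [row_fold]
  rw [this, pvApply_foldl]
  rfl

theorem intfold_eq (canvas : List (List Int)) (a b n m : Nat) (f : Int → Int → Int) :
    (PySem.List.pyRange (a : Int) ((a : Int) + (n : Int)) 1).foldl (fun cv x =>
        (PySem.List.pyRange (b : Int) ((b : Int) + (m : Int)) 1).foldl
          (fun cv y => pvWrite cv x y (f x y)) cv) canvas
      = pvApply canvas (pvRect a b n m (fun i j => f i j)) := by
  rw [PySem.List.pyRange_one, PySem.List.pyRange_one]
  simp only [add_sub_cancel_left, Int.toNat_natCast, List.foldl_map]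
  simp only [← Nat.cast_add, pvWrite_natCast]
  exact rect_fold canvas a b n m (fun i j => f (i : Int) (j : Int))

theorem tb_fold (cv : List (List Int)) (a b n : Nat) (c : Int) (hn : 0 < n) :
    (PySem.List.pyRange (a : Int) ((a : Int) + (n : Int)) 1).foldl
        (fun cv x => pvWrite (pvWrite cv x (b : Int) c) x ((b : Int) + (n : Int) - 1) c) cv
      = pvApply cv (pvTB a b (b + n - 1) n c) := by
  rw [PySem.List.pyRange_one]
  simp only [add_sub_cancel_left, Int.toNat_natCast, List.foldl_map]
  have hb2 : ((b : Int) + (n : Int) - 1) = ((b + n - 1 : Nat) : Int) := by omega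
  have hbody : ∀ (cv : List (List Int)) (ki : Nat),
      pvWrite (pvWrite cv ((a : Int) + (ki : Int)) (b : Int) c) ((a : Int) + (ki : Int))
          ((b : Int) + (n : Int) - 1) c
        = pvApply cv [(a + ki, b, c), (a + ki, b + n - 1, c)] := by
    intro cv ki
    rw [hb2, show ((a : Int) + (ki : Int)) = ((a + ki : Nat) : Int) by push_cast; ring,
      pvWrite_natCast, pvWrite_natCast]
    rfl
  simp only [hbody]
  rw [pvApply_foldl]
  rfl

theorem lr_fold (cv : List (List Int)) (a b n : Nat) (c : Int) (hn : 0 < n) :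
    (PySem.List.pyRange (b : Int) ((b : Int) + (n : Int)) 1).foldl
        (fun cv y => pvWrite (pvWrite cv (a : Int) y c) ((a : Int) + (n : Int) - 1) y c) cv
      = pvApply cv (pvLR a (a + n - 1) b n c) := by
  rw [PySem.List.pyRange_one]
  simp only [add_sub_cancel_left, Int.toNat_natCast, List.foldl_map]
  have ha2 : ((a : Int) + (n : Int) - 1) = ((a + n - 1 : Nat) : Int) := by omega
  have hbody : ∀ (cv : List (List Int)) (kj : Nat),
      pvWrite (pvWrite cv (a : Int) ((b : Int) + (kj : Int)) c) ((a : Int) + (n : Int) - 1)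
          ((b : Int) + (kj : Int)) c
        = pvApply cv [(a, b + kj, c), (a + n - 1, b + kj, c)] := by
    intro cv kj
    rw [ha2, show ((b : Int) + (kj : Int)) = ((b + kj : Nat) : Int) by push_cast; ring,
      pvWrite_natCast, pvWrite_natCast]
    rfl
  simp only [hbody]
  rw [pvApply_foldl]
  rfl


-- cellwise extensionality
theorem pvEqOfCells (u v : List (List Int)) (h1 : u.length = v.length)
    (h2 : ∀ i, (u.getD i []).length = (v.getD i []).length)
    (h3 : ∀ i j, pvCell u i j = pvCell v i j) : u = v := by
  apply List.ext_getElem h1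
  intro i hi hi'
  apply List.ext_getElem
  · have := h2 i
    rwa [List.getD_eq_getElem _ _ hi, List.getD_eq_getElem _ _ hi'] at this
  · intro j hj hj'
    have := h3 i j
    unfold pvCell at this
    rwa [List.getD_eq_getElem _ _ hi, List.getD_eq_getElem _ _ hi',
      List.getD_eq_getElem _ _ hj, List.getD_eq_getElem _ _ hj'] at this


-- membership characterisations (for the bounds side conditions)
theorem mem_pvRect (a b n m : Nat) (g : Nat → Nat → Int) (w : Nat × Nat × Int)
    (hw : w ∈ pvRect a b n m g) :
    a ≤ w.1 ∧ w.1 < a + n ∧ b ≤ w.2.1 ∧ w.2.1 < b + m := by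
  simp only [pvRect, pvRow, List.mem_flatMap, List.mem_map, List.mem_range] at hw
  obtain ⟨ki, hki, kj, hkj, hw⟩ := hw
  subst hw; simp; omega

theorem mem_pvTB (a b b2 n : Nat) (c : Int) (w : Nat × Nat × Int)
    (hw : w ∈ pvTB a b b2 n c) :
    a ≤ w.1 ∧ w.1 < a + n ∧ (w.2.1 = b ∨ w.2.1 = b2) := by
  simp only [pvTB, List.mem_flatMap, List.mem_range, List.mem_cons,
    List.not_mem_nil, or_false] at hw
  obtain ⟨ki, hki, hw⟩ := hw
  rcases hw with hw | hw <;> subst hw <;> simp <;> omega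

theorem mem_pvLR (a a2 b n : Nat) (c : Int) (w : Nat × Nat × Int)
    (hw : w ∈ pvLR a a2 b n c) :
    b ≤ w.2.1 ∧ w.2.1 < b + n ∧ (w.1 = a ∨ w.1 = a2) := by
  simp only [pvLR, List.mem_flatMap, List.mem_range, List.mem_cons,
    List.not_mem_nil, or_false] at hw
  obtain ⟨kj, hkj, hw⟩ := hw
  rcases hw with hw | hw <;> subst hw <;> simp <;> omega

-- the heart of the equivalence, with the loop bounds already in Nat form
theorem main_core (canvas : List (List Int)) (a b n : Nat) (c1 : Int) (c2o : Option Int)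
    (hn0 : 0 < n) (hlen : a + n ≤ canvas.length)
    (hrow : ∀ i : Nat, a ≤ i → i < a + n → b + n ≤ (canvas.getD i []).length) :
    ((PySem.List.pyRange (a : Int) ((n : Int) + (a : Int)) 1).foldl (fun cv x =>
      (PySem.List.pyRange (b : Int) ((n : Int) + (b : Int)) 1).foldl (fun cv y =>
        if x = (a : Int) ∨ y = (b : Int) ∨ x = (a : Int) + (n : Int) - 1 ∨ y = (b : Int) + (n : Int) - 1 then
          match c2o with
          | none => pvWrite cv x y c1
          | some c => pvWrite cv x y c
        else pvWrite cv x y c1) cv) canvas)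
    = (let filled := (PySem.List.pyRange (a : Int) ((a : Int) + (n : Int)) 1).foldl (fun cv x =>
          (PySem.List.pyRange (b : Int) ((b : Int) + (n : Int)) 1).foldl
            (fun cv y => pvWrite cv x y c1) cv) canvas
       match c2o with
       | none => filled
       | some c2 =>
         let h := (PySem.List.pyRange (a : Int) ((a : Int) + (n : Int)) 1).foldl
           (fun cv x => pvWrite (pvWrite cv x (b : Int) c2) x ((b : Int) + (n : Int) - 1) c2) filled
         (PySem.List.pyRange (b : Int) ((b : Int) + (n : Int)) 1).foldl
           (fun cv y => pvWrite (pvWrite cv (a : Int) y c2) ((a : Int) + (n : Int) - 1) y c2) h) := by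
  rw [show ((n : Int) + (a : Int)) = ((a : Int) + (n : Int)) from add_comm _ _,
    show ((n : Int) + (b : Int)) = ((b : Int) + (n : Int)) from add_comm _ _]
  cases c2o with
  | none =>
    have hbody : ∀ (cv : List (List Int)) (x y : Int),
        (if x = (a : Int) ∨ y = (b : Int) ∨ x = (a : Int) + (n : Int) - 1 ∨ y = (b : Int) + (n : Int) - 1 then
          pvWrite cv x y c1 else pvWrite cv x y c1) = pvWrite cv x y c1 := by
      intro cv x y; rw [ite_self]
    dsimp only
    simp only [hbody]
  | some c =>
    dsimp only
    have hbody : ∀ (cv : List (List Int)) (x y : Int),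
        (if x = (a : Int) ∨ y = (b : Int) ∨ x = (a : Int) + (n : Int) - 1 ∨ y = (b : Int) + (n : Int) - 1 then
          pvWrite cv x y c else pvWrite cv x y c1)
        = pvWrite cv x y (if x = (a : Int) ∨ y = (b : Int) ∨ x = (a : Int) + (n : Int) - 1 ∨ y = (b : Int) + (n : Int) - 1 then c else c1) := by
      intro cv x y; split_ifs <;> rfl
    simp only [hbody]
    rw [intfold_eq canvas a b n n
      (fun x y => if x = (a : Int) ∨ y = (b : Int) ∨ x = (a : Int) + (n : Int) - 1 ∨ y = (b : Int) + (n : Int) - 1 then c else c1)]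
    rw [intfold_eq canvas a b n n (fun _ _ => c1)]
    rw [tb_fold _ a b n c hn0, lr_fold _ a b n c hn0]
    rw [← pvApply_append, ← pvApply_append]
    have hbA : ∀ w ∈ pvRect a b n n
        (fun i j => if (i : Int) = (a : Int) ∨ (j : Int) = (b : Int) ∨ (i : Int) = (a : Int) + (n : Int) - 1 ∨ (j : Int) = (b : Int) + (n : Int) - 1 then c else c1),
        w.1 < canvas.length ∧ w.2.1 < (canvas.getD w.1 []).length := by
      intro w hw
      obtain ⟨h1, h2, h3, h4⟩ := mem_pvRect _ _ _ _ _ _ hw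
      exact ⟨by omega, by have := hrow w.1 h1 h2; omega⟩
    have hbB : ∀ w ∈ pvRect a b n n (fun _ _ => c1) ++ (pvTB a b (b + n - 1) n c ++ pvLR a (a + n - 1) b n c),
        w.1 < canvas.length ∧ w.2.1 < (canvas.getD w.1 []).length := by
      intro w hw
      rcases List.mem_append.1 hw with hw | hw
      · obtain ⟨h1, h2, h3, h4⟩ := mem_pvRect _ _ _ _ _ _ hw
        exact ⟨by omega, by have := hrow w.1 h1 h2; omega⟩
      · rcases List.mem_append.1 hw with hw | hw
        · obtain ⟨h1, h2, h3⟩ := mem_pvTB _ _ _ _ _ _ hw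
          exact ⟨by omega, by have := hrow w.1 h1 h2; omega⟩
        · obtain ⟨h1, h2, h3⟩ := mem_pvLR _ _ _ _ _ _ hw
          refine ⟨by omega, ?_⟩
          have hw1 : a ≤ w.1 ∧ w.1 < a + n := by omega
          have := hrow w.1 hw1.1 hw1.2
          omega
    apply pvEqOfCells
    · rw [length_pvApply, length_pvApply]
    · intro i; rw [rowlen_pvApply, rowlen_pvApply]
    · intro i j
      rw [pvCell_pvApply _ _ _ _ hbA, pvCell_pvApply _ _ _ _ hbB]
      congr 1
      rw [pvLW_append, pvLW_append, pvLW_pvRect, pvLW_pvRect, pvLW_pvTB, pvLW_pvLR]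
      by_cases hR : a ≤ i ∧ i < a + n ∧ b ≤ j ∧ j < b + n
      · rw [if_pos hR, if_pos hR]
        by_cases hLR : b ≤ j ∧ j < b + n ∧ (i = a ∨ i = a + n - 1)
        · rw [if_pos hLR]
          simp only [Option.some_or]
          exact congrArg some (if_pos (by omega))
        · rw [if_neg hLR]
          by_cases hTB : a ≤ i ∧ i < a + n ∧ (j = b ∨ j = b + n - 1)
          · rw [if_pos hTB]
            simp only [Option.some_or, Option.none_or]
            exact congrArg some (if_pos (by omega))
          · rw [if_neg hTB]
            simp only [Option.none_or]
            exact congrArg some (if_neg (by omega))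
      · rw [if_neg hR, if_neg hR, if_neg (by omega), if_neg (by omega)]
        rfl

-- ===== VERDICT (by name: the statement is the Claim_ definition above) =====
theorem SquareDefine_spec : Claim_equal_SquareDefine := by
  intro canvas minX minY maxX maxY color1 color2 hdom hpre
  unfold Spec_SquareDefine
  by_cases hs : min (maxX - minX) (maxY - minY) ≤ 0
  · have e1 : PySem.List.pyRange minX (min (maxX - minX) (maxY - minY) + minX) 1 = [] :=
      PySem.List.pyRange_one_eq_nil (by omega)
    have e2 : PySem.List.pyRange minX (minX + min (maxX - minX) (maxY - minY)) 1 = [] :=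
      PySem.List.pyRange_one_eq_nil (by omega)
    have e3 : PySem.List.pyRange minY (minY + min (maxX - minX) (maxY - minY)) 1 = [] :=
      PySem.List.pyRange_one_eq_nil (by omega)
    cases color2 <;> simp [SquareDefine, SquareDefine_alt, e1, e2, e3]
  · rw [not_le] at hs
    obtain ⟨hx0, hy0, hlenI, hrowsI⟩ := hpre hs
    obtain ⟨a, ha⟩ := Int.eq_ofNat_of_zero_le hx0
    obtain ⟨b, hb⟩ := Int.eq_ofNat_of_zero_le hy0
    obtain ⟨n, hn⟩ := Int.eq_ofNat_of_zero_le (le_of_lt hs)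
    subst ha; subst hb
    have hn0 : 0 < n := by omega
    rw [hn] at hlenI hrowsI
    have hlen : a + n ≤ canvas.length := by
      have := hlenI; omega
    have hrow : ∀ i : Nat, a ≤ i → i < a + n → b + n ≤ (canvas.getD i []).length := by
      intro i h1 h2
      have hmem : ((i : Int)) ∈ PySem.List.pyRange (a : Int) ((a : Int) + (n : Int)) 1 := by
        rw [PySem.List.mem_pyRange_one]
        constructor <;> omega
      have := hrowsI _ hmem
      rw [PySem.List.pyGetD_natCast] at this
      omega
    unfold SquareDefine SquareDefine_alt
    rw [hn]
    exact main_core canvas a b n color1 color2 hn0 hlen hrow
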